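-- pv_equiv track=rewrite | github.com/edjah/Euler | problems/prime.py | totient_table
-- ===== SOURCE A (Python) =====
-- def totient_table(n):
--     phi = [0] * (n + 1)
--     phi[1] = 1
--     q = int(n ** 0.5) + 1
--     for i in range(2, n + 1):
--         if phi[i] == 0:
--             phi[i] = i - 1
--             j = 2
--             while i * j <= n:
--                 if phi[j] == 0:
--                     j += 1
--                     continue
--                 q, f = j, i - 1
--                 while q % i == 0:
--                     f, q = f * i, q // i
--                 phi[i * j] = f * phi[q]
--                 j = j + 1
--     return phi
-- ===== SOURCE B (Python) =====
-- def totient_table(n):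
--     # classic in-place sieve: phi[k] starts at k; for every prime p divide out
--     # the factor (1 - 1/p) by an integer subtraction phi[k] -= phi[k] // p.
--     phi = list(range(n + 1))
--     for p in range(2, n + 1):
--         if phi[p] == p:  # p untouched so far <=> p prime
--             for k in range(p, n + 1, p):
--                 phi[k] -= phi[k] // p
--     return phi
-- ===== Notes on version B (the rewrite author's own statement) =====
-- stated objective: alternative
-- what changed: A fills the table prime by prime via multiplicativity: for each prime i and each j it pulls the full i-power out of j with an inner while loop and sets phi[i*j] = totient(i^(e+1)) * phi[q] from earlier table entries; B starts from phi[k] = k and, for each prime p, applies the factor (1 - 1/p) to every multiple of p by the single in-place integer subtraction phi[k] -= phi[k] // p, never reading any other table entry.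
-- crash fix: For n <= 0 A raises IndexError while seeding the table (the list it builds is too short to hold the seed entry); B naturally returns [0] for n = 0 and the empty list for negative n. — e.g. on totient_table(0): A raises IndexError, B returns [0]
import Mathlib
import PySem

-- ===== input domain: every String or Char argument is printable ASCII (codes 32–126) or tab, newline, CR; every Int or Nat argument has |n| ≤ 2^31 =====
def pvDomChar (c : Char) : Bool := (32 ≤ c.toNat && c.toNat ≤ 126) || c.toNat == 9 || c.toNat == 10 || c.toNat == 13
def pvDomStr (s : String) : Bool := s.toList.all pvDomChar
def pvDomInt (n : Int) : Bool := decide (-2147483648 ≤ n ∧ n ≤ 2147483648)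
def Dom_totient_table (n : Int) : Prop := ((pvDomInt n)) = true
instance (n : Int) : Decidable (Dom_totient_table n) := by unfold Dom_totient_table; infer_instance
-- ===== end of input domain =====

-- B replaces A's sieve (which factors the i-power out of each cofactor and multiplies earlier table entries)
-- by the classic in-place subtractive sieve phi[k] -= phi[k] // p: a different algorithm of similar cost.
-- For n ≤ 0 the Python A raises IndexError (excluded by Pre_); B returns a value there (Raises_ block).

-- ===== PORT A =====
-- 'while q % i == 0: f, q = f * i, q // i'; fuel j.toNat is always sufficient (q starts at j and strictly shrinks).
def pvPull (i : Int) : Nat → Int × Int → Int × Int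
  | 0, fq => fq
  | fu + 1, (f, q) =>
    if PySem.Int.mod q i == 0 then pvPull i fu (f * i, PySem.Int.floordiv q i) else (f, q)

-- one iteration of the inner 'while i * j <= n' body (the 'continue' branch leaves phi unchanged)
def pvInnerStep (i : Int) (phi : List Int) (j : Int) : List Int :=
  if PySem.List.pyGetD phi j 0 == 0 then phi
  else
    let fq := pvPull i j.toNat (i - 1, j)
    PySem.List.pySetD phi (i * j) (fq.1 * PySem.List.pyGetD phi fq.2 0)

-- the inner 'j = 2; while i * j <= n: …; j += 1' increments j unconditionally, hence is for j in range(2, n//i + 1)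
def pvOuterStep (n : Int) (phi : List Int) (i : Int) : List Int :=
  if PySem.List.pyGetD phi i 0 == 0 then
    (PySem.List.pyRange 2 (PySem.Int.floordiv n i + 1) 1).foldl (pvInnerStep i)
      (PySem.List.pySetD phi i (i - 1))
  else phi

-- Python's 'q = int(n ** 0.5) + 1' is dead code: q is reassigned before every use; omitted.
def totient_table (n : Int) : List Int :=
  (PySem.List.pyRange 2 (n + 1) 1).foldl (pvOuterStep n)
    (PySem.List.pySetD (List.replicate (n + 1).toNat 0) 1 1)

-- ===== PORT B =====
-- inner statement 'phi[k] -= phi[k] // p'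
def pvAltInner (p : Int) (phi : List Int) (k : Int) : List Int :=
  PySem.List.pySetD phi k
    (PySem.List.pyGetD phi k 0 - PySem.Int.floordiv (PySem.List.pyGetD phi k 0) p)

-- one outer iteration: 'if phi[p] == p: for k in range(p, n + 1, p): ...'
def pvAltOuter (n : Int) (phi : List Int) (p : Int) : List Int :=
  if PySem.List.pyGetD phi p 0 == p then
    (PySem.List.pyRange p (n + 1) p).foldl (pvAltInner p) phi
  else phi

-- 'phi = list(range(n + 1))' then the sieve over p = 2 .. n
def totient_table_alt (n : Int) : List Int :=
  (PySem.List.pyRange 2 (n + 1) 1).foldl (pvAltOuter n) (PySem.List.pyRange 0 (n + 1) 1)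

-- ===== PRECONDITION & SPEC =====
-- Pre_ excludes exactly n ≤ 0, where the Python A raises IndexError while seeding the table.
def Pre_totient_table (n : Int) : Prop := 1 ≤ n
instance (n : Int) : Decidable (Pre_totient_table n) := by unfold Pre_totient_table; infer_instance
def pvWitness_totient_table : Int := 6

-- For n ≤ 0 A raises IndexError while seeding the table (it is too short); B returns [0] for n = 0 and [] for n < 0.
def Raises_totient_table (n : Int) : Prop := n ≤ 0
instance (n : Int) : Decidable (Raises_totient_table n) := by unfold Raises_totient_table; infer_instance
def pvRaiseWitness_totient_table : Int := 0
def pvRaiseWitnessOut_totient_table : List Int := [0]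

def Spec_totient_table (n : Int) (out : List Int) : Prop := out = totient_table_alt n
instance (n : Int) (out : List Int) : Decidable (Spec_totient_table n out) := by unfold Spec_totient_table; infer_instance

-- ===== CLAIM (what is proved, stated in full; the proofs are below) =====
def Claim_equal_totient_table : Prop := ∀ (n : Int), Dom_totient_table n → Pre_totient_table n → Spec_totient_table n (totient_table n)
def Claim_raises_totient_table : Prop := (∀ (n : Int), Dom_totient_table n → Raises_totient_table n → ¬ Pre_totient_table n) ∧ (Dom_totient_table (pvRaiseWitness_totient_table) ∧ Raises_totient_table (pvRaiseWitness_totient_table) ∧ totient_table_alt (pvRaiseWitness_totient_table) = pvRaiseWitnessOut_totient_table)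

-- ===== LEMMAS AND PROOFS =====

-- k is b-smooth: every prime factor of k is ≤ b
def pvSmooth (b k : ℕ) : Prop := ∀ p ∈ k.primeFactors, p ≤ b

-- invariant of A's outer loop after processing i = 2 .. b
def pvInv (n b : ℕ) (phi : List Int) : Prop :=
  phi.length = n + 1 ∧
    ∀ k, k ≤ n → (pvSmooth b k → phi.getD k 0 = (Nat.totient k : Int)) ∧
      (¬ pvSmooth b k → phi.getD k 0 = 0)

-- the set of filled indices while prime p's inner pass has processed j' = 2 .. j-1
def pvQ (p j k : ℕ) : Prop :=
  pvSmooth (p - 1) k ∨ k = p ∨ (p ∣ k ∧ 2 * p ≤ k ∧ k < p * j ∧ pvSmooth p k)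

def pvInvQ (n p j : ℕ) (phi : List Int) : Prop :=
  phi.length = n + 1 ∧
    ∀ k, k ≤ n → (pvQ p j k → phi.getD k 0 = (Nat.totient k : Int)) ∧
      (¬ pvQ p j k → phi.getD k 0 = 0)

-- ---------- A side ----------

theorem pvPull_spec (p : ℕ) (hp : 2 ≤ p) : ∀ (fu r : ℕ) (f0 : Int), 1 ≤ r → r ≤ fu →
    ∃ e r' : ℕ, r = p ^ e * r' ∧ ¬ p ∣ r' ∧ 1 ≤ r' ∧
      pvPull (p : Int) fu (f0, (r : Int)) = (f0 * ((p ^ e : ℕ) : Int), (r' : Int)) := by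
  intro fu
  induction fu with
  | zero => intro r f0 h1 h2; omega
  | succ fu ih =>
    intro r f0 h1 h2
    have hmod := PySem.Int.mod_natCast r p
    by_cases hdr : p ∣ r
    · have hr2 : p ≤ r := Nat.le_of_dvd (by omega) hdr
      have hlt : r / p < r := Nat.div_lt_self (by omega) (by omega)
      have hpos : 1 ≤ r / p := Nat.one_le_div_iff (by omega) |>.mpr hr2
      obtain ⟨e, r', heq, hnd, hr', hres⟩ := ih (r / p) (f0 * (p : Int)) hpos (by omega)
      refine ⟨e + 1, r', ?_, hnd, hr', ?_⟩
      · calc r = p * (r / p) := (Nat.mul_div_cancel' hdr).symm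
          _ = p * (p ^ e * r') := by rw [heq]
          _ = p ^ (e + 1) * r' := by ring
      · show pvPull (p : Int) (fu + 1) (f0, (r : Int)) = _
        unfold pvPull
        have hz : r % p = 0 := (Nat.dvd_iff_mod_eq_zero).mp hdr
        rw [hmod, hz]
        simp only [Nat.cast_zero, beq_self_eq_true, if_true]
        rw [PySem.Int.floordiv_natCast, hres]
        congr 1
        push_cast
        ring
    · refine ⟨0, r, by simp, hdr, h1, ?_⟩
      show pvPull (p : Int) (fu + 1) (f0, (r : Int)) = _
      unfold pvPull
      have hne : r % p ≠ 0 := fun h => hdr (Nat.dvd_of_mod_eq_zero h)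
      rw [hmod]
      have hb : (((r % p : ℕ) : Int) == (0 : Int)) = false := by
        simp only [beq_eq_false_iff_ne, ne_eq, Nat.cast_eq_zero]
        exact hne
      rw [hb]
      simp

theorem pvSmooth_mono {b b' k : ℕ} (h : b ≤ b') : pvSmooth b k → pvSmooth b' k := by
  intro hs p hpk; exact le_trans (hs p hpk) h

theorem pvSmooth_of_dvd {b m k : ℕ} (hk : k ≠ 0) (hd : m ∣ k) : pvSmooth b k → pvSmooth b m := by
  intro hs p hpm; exact hs p (Nat.primeFactors_mono hd hk hpm)

theorem pvSmooth_zero (b : ℕ) : pvSmooth b 0 := by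
  intro p hp; simp at hp

theorem pvSmooth_one (b : ℕ) : pvSmooth b 1 := by
  intro p hp; simp at hp

theorem not_pvSmooth_one {k : ℕ} (hk : 2 ≤ k) : ¬ pvSmooth 1 k := by
  intro hs
  have hm : k.minFac ∈ k.primeFactors := by
    rw [Nat.mem_primeFactors]
    exact ⟨Nat.minFac_prime (by omega), Nat.minFac_dvd k, by omega⟩
  have h2 : 2 ≤ k.minFac := (Nat.minFac_prime (by omega : k ≠ 1)).two_le
  have := hs _ hm
  omega

theorem pvSmooth_prime_self {p : ℕ} (hp : p.Prime) : pvSmooth p p := by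
  intro q hq; rw [hp.primeFactors] at hq; simp at hq; omega

theorem not_pvSmooth_pred_prime {p : ℕ} (hp : p.Prime) : ¬ pvSmooth (p - 1) p := by
  intro hs
  have := hs p (by rw [hp.primeFactors]; simp)
  have := hp.two_le
  omega

theorem pvSmooth_pred_of_not_dvd {p k : ℕ} (hp : p.Prime) (hnd : ¬ p ∣ k) :
    pvSmooth p k → pvSmooth (p - 1) k := by
  intro hs q hq
  have h1 := hs q hq
  have h2 := Nat.mem_primeFactors.mp hq
  have hne : q ≠ p := by rintro rfl; exact hnd h2.2.1
  omega

theorem pvSmooth_prime_mul {p j : ℕ} (hp : p.Prime) (hj : j ≠ 0) :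
    pvSmooth p (p * j) ↔ pvSmooth p j := by
  unfold pvSmooth
  rw [Nat.primeFactors_mul hp.ne_zero hj, hp.primeFactors]
  constructor
  · intro h q hq; exact h q (Finset.mem_union_right _ hq)
  · intro h q hq
    rcases Finset.mem_union.mp hq with h1 | h2
    · simp at h1; omega
    · exact h q h2

theorem pvSmooth_succ_of_not_prime {i k : ℕ} (hi : ¬ i.Prime) :
    pvSmooth i k ↔ pvSmooth (i - 1) k := by
  constructor
  · intro hs q hq
    have h1 := hs q hq
    have h2 := Nat.mem_primeFactors.mp hq
    have : q ≠ i := by rintro rfl; exact hi h2.1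
    omega
  · exact pvSmooth_mono (by omega)

theorem prime_of_not_pvSmooth_pred {i : ℕ} (hi : 2 ≤ i) (h : ¬ pvSmooth (i - 1) i) :
    i.Prime := by
  by_contra hnp
  apply h
  intro q hq
  have h2 := Nat.mem_primeFactors.mp hq
  have hle := Nat.le_of_mem_primeFactors hq
  have : q ≠ i := by rintro rfl; exact hnp h2.1
  omega

theorem pvQ_smooth {p j : ℕ} (hp : p.Prime) (_hj : 2 ≤ j) (h : pvQ p j j) : pvSmooth p j := by
  rcases h with h | h | h
  · exact pvSmooth_mono (by omega) h
  · subst h; exact pvSmooth_prime_self hp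
  · exact h.2.2.2

theorem pvQ_of_smooth {p j : ℕ} (hp : p.Prime) (hj : 2 ≤ j) (h : pvSmooth p j) : pvQ p j j := by
  have hp2 := hp.two_le
  by_cases hd : p ∣ j
  · obtain ⟨m, rfl⟩ := hd
    rcases Nat.lt_or_ge m 2 with hm | hm
    · interval_cases m
      · omega
      · right; left; omega
    · right; right
      exact ⟨⟨m, rfl⟩, by nlinarith, by nlinarith, h⟩
  · left; exact pvSmooth_pred_of_not_dvd hp hd h

theorem pvQ_succ_of_ne {p j k : ℕ} (hk : k ≠ p * j) : pvQ p (j + 1) k ↔ pvQ p j k := by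
  unfold pvQ
  constructor
  · rintro (h | h | ⟨⟨m, rfl⟩, h2, h3, h4⟩)
    · exact Or.inl h
    · exact Or.inr (Or.inl h)
    · right; right
      refine ⟨⟨m, rfl⟩, h2, ?_, h4⟩
      rcases Nat.lt_or_ge (p * m) (p * j) with h5 | h5
      · exact h5
      · exfalso
        have hp0 : 0 < p := by nlinarith
        have : m = j := by
          have := Nat.le_of_mul_le_mul_left h5 hp0
          have := Nat.lt_of_mul_lt_mul_left (a := p) h3
          omega
        exact hk (by rw [this])
  · rintro (h | h | ⟨h1, h2, h3, h4⟩)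
    · exact Or.inl h
    · exact Or.inr (Or.inl h)
    · right; right; exact ⟨h1, h2, by nlinarith, h4⟩

theorem pvQ_succ_self {p j : ℕ} (hp : p.Prime) (hj : 2 ≤ j) :
    pvQ p (j + 1) (p * j) ↔ pvSmooth p j := by
  have hp2 := hp.two_le
  constructor
  · rintro (h | h | h)
    · exfalso
      have hm : p ∈ (p * j).primeFactors := by
        rw [Nat.mem_primeFactors]
        exact ⟨hp, ⟨j, rfl⟩, by positivity⟩
      have := h p hm
      omega
    · exfalso; nlinarith
    · exact (pvSmooth_prime_mul hp (by omega)).mp h.2.2.2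
  · intro h
    right; right
    exact ⟨⟨j, rfl⟩, by nlinarith, by nlinarith, (pvSmooth_prime_mul hp (by omega)).mpr h⟩

theorem not_pvQ_mul {p j : ℕ} (hp : p.Prime) (hj : 2 ≤ j) : ¬ pvQ p j (p * j) := by
  have hp2 := hp.two_le
  rintro (h | h | h)
  · have hm : p ∈ (p * j).primeFactors := by
      rw [Nat.mem_primeFactors]
      exact ⟨hp, ⟨j, rfl⟩, by positivity⟩
    have := h p hm
    omega
  · nlinarith
  · have := h.2.2.1; omega

theorem pvGetD_set_self (xs : List Int) (m : ℕ) (v : Int) (h : m < xs.length) :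
    (xs.set m v).getD m 0 = v := by
  rw [List.getD_eq_getElem?_getD, List.getElem?_set_self (by omega)]
  rfl

theorem pvGetD_set_ne (xs : List Int) (m k : ℕ) (v : Int) (h : k ≠ m) :
    (xs.set m v).getD k 0 = xs.getD k 0 := by
  rw [List.getD_eq_getElem?_getD, List.getD_eq_getElem?_getD,
    List.getElem?_set_ne (by omega)]

theorem inner_step (N P jn : ℕ) (hP : P.Prime) (hj : 2 ≤ jn) (hjn : P * jn ≤ N)
    (phi : List Int) (h : pvInvQ N P jn phi) :
    pvInvQ N P (jn + 1) (pvInnerStep (P : Int) phi (jn : Int)) := by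
  have hP2 := hP.two_le
  obtain ⟨hlen, H⟩ := h
  have hjN : jn ≤ N := by nlinarith
  unfold pvInnerStep
  by_cases hq : pvQ P jn jn
  · have hval : phi.getD jn 0 = (Nat.totient jn : Int) := (H jn hjN).1 hq
    have htpos := Nat.totient_pos.mpr (show 0 < jn by omega)
    have hcond : ¬ ((PySem.List.pyGetD phi (jn : Int) 0 == 0) = true) := by
      rw [PySem.List.pyGetD_natCast, hval]
      simp only [beq_iff_eq, Nat.cast_eq_zero]
      omega
    rw [if_neg hcond]
    show pvInvQ N P (jn + 1) (PySem.List.pySetD phi ((P : Int) * (jn : Int))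
      ((pvPull (P : Int) ((jn : Int)).toNat ((P : Int) - 1, (jn : Int))).1 *
        PySem.List.pyGetD phi
          (pvPull (P : Int) ((jn : Int)).toNat ((P : Int) - 1, (jn : Int))).2 0))
    obtain ⟨e, q, heq, hnd, hq1, hpres⟩ :=
      pvPull_spec P hP2 jn jn ((P : Int) - 1) (by omega) le_rfl
    rw [show ((jn : Int)).toNat = jn from by simp, hpres]
    have hsmj : pvSmooth P jn := pvQ_smooth hP hj hq
    have hqdvd : q ∣ jn := ⟨P ^ e, by rw [heq]; ring⟩
    have hsq : pvSmooth (P - 1) q :=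
      pvSmooth_pred_of_not_dvd hP hnd (pvSmooth_of_dvd (by omega) hqdvd hsmj)
    have hqN : q ≤ N := le_trans (Nat.le_of_dvd (by omega) hqdvd) hjN
    have hvq : phi.getD q 0 = (Nat.totient q : Int) := (H q hqN).1 (Or.inl hsq)
    have hv : ((P : Int) - 1) * ((P ^ e : ℕ) : Int) * (Nat.totient q : Int)
        = ((Nat.totient (P * jn) : ℕ) : Int) := by
      have h1 : Nat.totient (P * jn) = (P - 1) * P ^ e * Nat.totient q := by
        have h2 : P * jn = P ^ (e + 1) * q := by rw [heq]; ring
        rw [h2, Nat.totient_mul (((hP.coprime_iff_not_dvd).mpr hnd).pow_left (e + 1)),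
          Nat.totient_prime_pow hP (by omega)]
        simp only [Nat.add_sub_cancel]
        ring
      rw [h1, Nat.cast_mul, Nat.cast_mul, Nat.cast_sub (by omega), Nat.cast_one]
    show pvInvQ N P (jn + 1) (PySem.List.pySetD phi ((P : Int) * (jn : Int))
      (((P : Int) - 1) * ((P ^ e : ℕ) : Int) * PySem.List.pyGetD phi (q : Int) 0))
    rw [PySem.List.pyGetD_natCast, hvq, hv,
      show (P : Int) * (jn : Int) = ((P * jn : ℕ) : Int) from by push_cast; ring,
      PySem.List.pySetD_natCast]
    refine ⟨by rw [List.length_set]; exact hlen, ?_⟩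
    intro k hk
    by_cases hkp : k = P * jn
    · subst hkp
      rw [pvGetD_set_self _ _ _ (by omega)]
      refine ⟨fun _ => rfl, fun hnq => ?_⟩
      exact absurd ((pvQ_succ_self hP hj).mpr hsmj) hnq
    · rw [pvGetD_set_ne _ _ _ _ hkp, pvQ_succ_of_ne hkp]
      exact H k hk
  · have hval : phi.getD jn 0 = 0 := (H jn hjN).2 hq
    have hcond : ((PySem.List.pyGetD phi (jn : Int) 0 == 0) = true) := by
      rw [PySem.List.pyGetD_natCast, hval]; simp
    rw [if_pos hcond]
    refine ⟨hlen, ?_⟩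
    intro k hk
    by_cases hkp : k = P * jn
    · subst hkp
      have hnsm : ¬ pvSmooth P jn := fun hs => hq (pvQ_of_smooth hP hj hs)
      have hnew : ¬ pvQ P (jn + 1) (P * jn) := fun hQ => hnsm ((pvQ_succ_self hP hj).mp hQ)
      exact ⟨fun hQ => absurd hQ hnew, fun _ => (H (P * jn) hk).2 (not_pvQ_mul hP hj)⟩
    · rw [pvQ_succ_of_ne hkp]
      exact H k hk

theorem inner_base (N P : ℕ) (hP : P.Prime) (hPN : P ≤ N) (phi : List Int)
    (h : pvInv N (P - 1) phi) :
    pvInvQ N P 2 (PySem.List.pySetD phi (P : Int) ((P : Int) - 1)) := by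
  have hP2 := hP.two_le
  obtain ⟨hlen, H⟩ := h
  rw [show (P : Int) - 1 = ((P - 1 : ℕ) : Int) from by
      rw [Nat.cast_sub (by omega), Nat.cast_one],
    PySem.List.pySetD_natCast]
  refine ⟨by rw [List.length_set]; exact hlen, ?_⟩
  intro k hk
  by_cases hkp : k = P
  · subst hkp
    rw [pvGetD_set_self _ _ _ (by omega)]
    constructor
    · intro _
      rw [Nat.totient_prime hP]
    · intro hnq
      exact absurd (Or.inr (Or.inl rfl)) hnq
  · rw [pvGetD_set_ne _ _ _ _ hkp]
    have hiff : pvQ P 2 k ↔ pvSmooth (P - 1) k := by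
      constructor
      · rintro (h1 | h1 | h1)
        · exact h1
        · exact absurd h1 hkp
        · omega
      · exact Or.inl
    rw [hiff]
    exact H k hk

theorem inner_fold (N P : ℕ) (hP : P.Prime) (_hPN : P ≤ N) (phi1 : List Int)
    (h : pvInvQ N P 2 phi1) : ∀ m : ℕ, 2 ≤ m → m ≤ N / P + 1 →
    pvInvQ N P m ((PySem.List.pyRange 2 (m : Int) 1).foldl (pvInnerStep (P : Int)) phi1) := by
  intro m hm2
  induction m, hm2 using Nat.le_induction with
  | base =>
    intro _
    rw [show ((2 : ℕ) : Int) = 2 from by norm_num,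
      PySem.List.pyRange_one_eq_nil (by norm_num), List.foldl_nil]
    exact h
  | succ m hm ih =>
    intro hle
    have hsplit : PySem.List.pyRange 2 ((m + 1 : ℕ) : Int) 1
        = PySem.List.pyRange 2 (m : Int) 1 ++ [(m : Int)] := by
      push_cast
      exact PySem.List.pyRange_one_succ_right (by exact_mod_cast (by omega : (2 : ℤ) ≤ (m : ℤ)))
    rw [hsplit, List.foldl_append, List.foldl_cons, List.foldl_nil]
    have hmP : P * m ≤ N := by
      rw [mul_comm]
      exact (Nat.le_div_iff_mul_le hP.pos).mp (by omega)
    exact inner_step N P m hP hm hmP _ (ih (by omega))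

theorem invQ_to_inv (N P : ℕ) (hP : P.Prime) (phi : List Int)
    (h : pvInvQ N P (N / P + 1) phi) : pvInv N P phi := by
  have hP2 := hP.two_le
  obtain ⟨hlen, H⟩ := h
  refine ⟨hlen, ?_⟩
  intro k hk
  have hiff : pvQ P (N / P + 1) k ↔ pvSmooth P k := by
    constructor
    · rintro (h1 | h1 | h1)
      · exact pvSmooth_mono (by omega) h1
      · subst h1; exact pvSmooth_prime_self hP
      · exact h1.2.2.2
    · intro hs
      by_cases hd : P ∣ k
      · obtain ⟨m, rfl⟩ := hd
        rcases Nat.lt_or_ge m 2 with hm | hm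
        · interval_cases m
          · left; exact pvSmooth_zero _
          · right; left; omega
        · right; right
          refine ⟨⟨m, rfl⟩, by nlinarith, ?_, hs⟩
          have hmd : m ≤ N / P := (Nat.le_div_iff_mul_le (by omega)).mpr (by nlinarith)
          calc P * m ≤ P * (N / P) := by exact Nat.mul_le_mul_left P hmd
            _ < P * (N / P + 1) := by nlinarith
      · left; exact pvSmooth_pred_of_not_dvd hP hd hs
  constructor
  · intro hs; exact (H k hk).1 (hiff.mpr hs)
  · intro hns; exact (H k hk).2 (fun hQ => hns (hiff.mp hQ))

theorem outer_step (N P : ℕ) (hP2 : 2 ≤ P) (hPN : P ≤ N) (phi : List Int)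
    (h : pvInv N (P - 1) phi) : pvInv N P (pvOuterStep (N : Int) phi (P : Int)) := by
  obtain ⟨hlen, H⟩ := h
  unfold pvOuterStep
  by_cases hsm : pvSmooth (P - 1) P
  · have hval : phi.getD P 0 = (Nat.totient P : Int) := (H P hPN).1 hsm
    have hnp : ¬ P.Prime := fun hp => absurd hsm (not_pvSmooth_pred_prime hp)
    have htpos := Nat.totient_pos.mpr (show 0 < P by omega)
    rw [if_neg (by
      rw [PySem.List.pyGetD_natCast, hval]
      simp only [beq_iff_eq, Nat.cast_eq_zero]
      omega)]
    refine ⟨hlen, ?_⟩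
    intro k hk
    rw [show pvSmooth P k ↔ pvSmooth (P - 1) k from pvSmooth_succ_of_not_prime hnp]
    exact H k hk
  · have hPp : P.Prime := prime_of_not_pvSmooth_pred (by omega) hsm
    have hval : phi.getD P 0 = 0 := (H P hPN).2 hsm
    rw [if_pos (by rw [PySem.List.pyGetD_natCast, hval]; simp)]
    have hb : PySem.Int.floordiv ((N : ℕ) : Int) ((P : ℕ) : Int) + 1
        = ((N / P + 1 : ℕ) : Int) := by
      rw [PySem.Int.floordiv_natCast]
      push_cast
      ring
    rw [hb]
    exact invQ_to_inv N P hPp _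
      (inner_fold N P hPp hPN _ (inner_base N P hPp hPN phi ⟨hlen, H⟩)
        (N / P + 1) (by have := (Nat.one_le_div_iff hPp.pos).mpr hPN; omega) le_rfl)

theorem inv_init (N : ℕ) (hN : 1 ≤ N) :
    pvInv N 1 (PySem.List.pySetD (List.replicate (N + 1) 0) 1 1) := by
  rw [show (1 : Int) = ((1 : ℕ) : Int) from rfl, PySem.List.pySetD_natCast]
  refine ⟨by rw [List.length_set, List.length_replicate], ?_⟩
  intro k hk
  rcases Nat.lt_or_ge k 2 with hk2 | hk2
  · interval_cases k
    · constructor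
      · intro _
        rw [pvGetD_set_ne _ _ _ _ (by norm_num), List.getD_eq_getElem?_getD,
          List.getElem?_replicate]
        simp [Nat.totient_zero]
      · intro hns
        exact absurd (pvSmooth_zero 1) hns
    · constructor
      · intro _
        rw [pvGetD_set_self _ _ _ (by rw [List.length_replicate]; omega)]
        rw [Nat.totient_one]
      · intro hns
        exact absurd (pvSmooth_one 1) hns
  · have hns := not_pvSmooth_one (k := k) (by omega)
    refine ⟨fun hs => absurd hs hns, fun _ => ?_⟩
    rw [pvGetD_set_ne _ _ _ _ (by omega), List.getD_eq_getElem?_getD,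
      List.getElem?_replicate]
    by_cases hkl : k < N + 1
    · simp [hkl]
    · simp [hkl]

theorem outer_fold (N : ℕ) (hN : 1 ≤ N) : ∀ i : ℕ, 1 ≤ i → i ≤ N →
    pvInv N i ((PySem.List.pyRange 2 ((i : Int) + 1) 1).foldl (pvOuterStep (N : Int))
      (PySem.List.pySetD (List.replicate (N + 1) 0) 1 1)) := by
  intro i hi1
  induction i, hi1 using Nat.le_induction with
  | base =>
    intro _
    rw [show ((1 : ℕ) : Int) + 1 = 2 from by norm_num,
      PySem.List.pyRange_one_eq_nil (by norm_num), List.foldl_nil]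
    exact inv_init N hN
  | succ i hi ih =>
    intro hle
    have hsplit : PySem.List.pyRange 2 (((i + 1 : ℕ) : Int) + 1) 1
        = PySem.List.pyRange 2 ((i : Int) + 1) 1 ++ [(i : Int) + 1] := by
      push_cast
      exact PySem.List.pyRange_one_succ_right (by exact_mod_cast (by omega : (2 : ℤ) ≤ (i : ℤ) + 1))
    rw [hsplit, List.foldl_append, List.foldl_cons, List.foldl_nil]
    have hstep := outer_step N (i + 1) (by omega) hle _
      (by rw [show i + 1 - 1 = i from by omega]; exact ih (by omega))
    rw [show ((i + 1 : ℕ) : Int) = (i : Int) + 1 from by push_cast; ring] at hstep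
    exact hstep

theorem a_eq_nat (N : ℕ) (hN : 1 ≤ N) :
    totient_table (N : Int) = (List.range (N + 1)).map (fun k => (Nat.totient k : Int)) := by
  obtain ⟨hlen, H⟩ := outer_fold N hN N hN le_rfl
  unfold totient_table
  rw [show ((N : Int) + 1).toNat = N + 1 from by omega]
  apply List.ext_getElem
  · rw [hlen]
    simp
  · intro idx h1 h2
    rw [List.getElem_map, List.getElem_range]
    have hidx : idx ≤ N := by
      rw [hlen] at h1
      omega
    have hsm : pvSmooth N idx := fun p hp =>
      le_trans (Nat.le_of_mem_primeFactors hp) hidx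
    have hv := (H idx hidx).1 hsm
    rw [List.getD_eq_getElem?_getD, List.getElem?_eq_getElem h1] at hv
    simpa using hv

theorem a_eq (n : Int) (hn : 1 ≤ n) :
    totient_table n = (List.range (n.toNat + 1)).map (fun k => (Nat.totient k : Int)) := by
  have hN : 1 ≤ n.toNat := by omega
  conv_lhs => rw [show n = (n.toNat : Int) from (Int.toNat_of_nonneg (by omega)).symm]
  exact a_eq_nat n.toNat hN

-- ---------- B side ----------

def pvGood (b k : ℕ) (v : Int) : Prop :=
  ∃ s t : ℕ, k = s * t ∧ pvSmooth b s ∧ (∀ p, p.Prime → p ∣ t → b < p) ∧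
    v = ((Nat.totient s * t : ℕ) : Int)

def pvBInv (n b : ℕ) (phi : List Int) : Prop :=
  phi.length = n + 1 ∧ ∀ k, k ≤ n → pvGood b k (phi.getD k 0)

-- during prime P's pass: multiples P*1 .. P*(j-1) already divided down, the rest untouched

def pvBMix (n P j : ℕ) (phi : List Int) : Prop :=
  phi.length = n + 1 ∧ ∀ k, k ≤ n →
    (P ∣ k → P * j ≤ k → pvGood (P - 1) k (phi.getD k 0)) ∧
    (¬ P ∣ k ∨ k < P * j → pvGood P k (phi.getD k 0))

theorem pvGood_zero_val {b : ℕ} {v : Int} (h : pvGood b 0 v) : v = 0 := by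
  obtain ⟨s, t, hk, _, _, hv⟩ := h
  rcases Nat.mul_eq_zero.mp hk.symm with rfl | rfl
  · simpa [Nat.totient_zero] using hv
  · simpa using hv

theorem pvGood_zero_mk {b : ℕ} {v : Int} (h : v = 0) : pvGood b 0 v :=
  ⟨0, 1, by simp, pvSmooth_zero b, fun p pp hp => absurd (Nat.eq_one_of_dvd_one hp) pp.ne_one,
    by simp [h, Nat.totient_zero]⟩

theorem pvGood_upgrade {P k : ℕ} {v : Int} (hP : 2 ≤ P) (hcase : ¬ P ∣ k ∨ ¬ P.Prime)
    (h : pvGood (P - 1) k v) : pvGood P k v := by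
  obtain ⟨s, t, hk, hs, ht, hv⟩ := h
  refine ⟨s, t, hk, pvSmooth_mono (by omega) hs, fun p pp hpt => ?_, hv⟩
  have h1 := ht p pp hpt
  have hne : p ≠ P := by
    rintro rfl
    rcases hcase with hnd | hnp
    · exact hnd (hk ▸ Dvd.dvd.mul_left hpt s)
    · exact hnp pp
  omega

theorem pvGood_prime_val {P : ℕ} {v : Int} (hP : P.Prime) (h : pvGood (P - 1) P v) :
    v = (P : Int) := by
  obtain ⟨s, t, hk, hs, ht, hv⟩ := h
  have hsd : s ∣ P := ⟨t, hk⟩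
  rcases (Nat.Prime.eq_one_or_self_of_dvd hP s hsd) with rfl | rfl
  · rw [one_mul] at hk
    rw [hv, Nat.totient_one, one_mul, hk]
  · exfalso
    exact not_pvSmooth_pred_prime hP hs

theorem pvFactorSplit (P : ℕ) (hP : 2 ≤ P) : ∀ t : ℕ, 1 ≤ t →
    ∃ e t' : ℕ, t = P ^ e * t' ∧ ¬ P ∣ t' ∧ 1 ≤ t' := by
  intro t
  induction t using Nat.strong_induction_on with
  | _ t ih =>
    intro ht
    by_cases hd : P ∣ t
    · have hPt : P ≤ t := Nat.le_of_dvd (by omega) hd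
      have hlt : t / P < t := Nat.div_lt_self (by omega) (by omega)
      have hpos : 1 ≤ t / P := Nat.one_le_div_iff (by omega) |>.mpr hPt
      obtain ⟨e, t', heq, hnd, h1⟩ := ih (t / P) hlt hpos
      refine ⟨e + 1, t', ?_, hnd, h1⟩
      calc t = P * (t / P) := (Nat.mul_div_cancel' hd).symm
        _ = P * (P ^ e * t') := by rw [heq]
        _ = P ^ (e + 1) * t' := by ring
    · exact ⟨0, t, by simp, hd, ht⟩

theorem pvGood_comp_val {P : ℕ} {v : Int} (hP2 : 2 ≤ P) (hnp : ¬ P.Prime)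
    (h : pvGood (P - 1) P v) : v = ((Nat.totient P : ℕ) : Int) ∧ v ≠ (P : Int) := by
  obtain ⟨s, t, hk, hs, ht, hv⟩ := h
  have htd : t ∣ P := ⟨s, by rw [hk]; ring⟩
  have ht0 : t ≠ 0 := by
    rintro rfl
    rw [mul_zero] at hk
    omega
  have ht1 : t = 1 := by
    by_contra h1
    have hq := Nat.minFac_prime h1
    have h2 := ht _ hq (Nat.minFac_dvd t)
    have h3 : t.minFac ∣ P := (Nat.minFac_dvd t).trans htd
    have h4 : t.minFac ≤ P := Nat.le_of_dvd (by omega) h3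
    have h5 : t.minFac = P := by omega
    exact hnp (h5 ▸ hq)
  subst ht1
  rw [mul_one] at hk
  constructor
  · rw [hv, mul_one, ← hk]
  · intro heq
    rw [hv, mul_one, ← hk] at heq
    have h6 : Nat.totient P = P := by exact_mod_cast heq
    have hlt := Nat.totient_lt P (by omega)
    omega

theorem pvBupdate {P m : ℕ} {v : Int} (hP : P.Prime) (hm : 1 ≤ m)
    (h : pvGood (P - 1) (P * m) v) :
    pvGood P (P * m) (v - PySem.Int.floordiv v (P : Int)) := by
  have hP2 := hP.two_le
  obtain ⟨s, t, hk, hs, ht, hv⟩ := h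
  have hpm : 0 < P * m := Nat.mul_pos (by omega) (by omega)
  have hs0 : s ≠ 0 := by rintro rfl; rw [zero_mul] at hk; omega
  have ht0 : t ≠ 0 := by rintro rfl; rw [mul_zero] at hk; omega
  have hPs : ¬ P ∣ s := by
    intro hd
    have : P ∈ s.primeFactors := Nat.mem_primeFactors.mpr ⟨hP, hd, hs0⟩
    have := hs P this
    omega
  have hPt : P ∣ t := by
    rcases (Nat.Prime.dvd_mul hP).mp (hk ▸ Dvd.intro m rfl : P ∣ s * t) with h | h
    · exact absurd h hPs
    · exact h
  obtain ⟨e, t', hte, hndt', ht'1⟩ := pvFactorSplit P hP2 t (by omega)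
  have he1 : 1 ≤ e := by
    rcases Nat.eq_zero_or_pos e with rfl | h1
    · rw [pow_zero, one_mul] at hte
      exact absurd (hte ▸ hPt) hndt'
    · exact h1
  have hcop : Nat.Coprime s (P ^ e) :=
    (((Nat.Prime.coprime_iff_not_dvd hP).mpr hPs).symm).pow_right e
  have hde : P ^ e = P ^ (e - 1) * P := by
    conv_lhs => rw [show e = (e - 1) + 1 by omega]
    rw [pow_succ]
  have hphi : Nat.totient (s * P ^ e) = s.totient * (P ^ (e - 1) * (P - 1)) := by
    rw [Nat.totient_mul hcop, Nat.totient_prime_pow hP (by omega)]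
  have hdiv : s.totient * t / P = s.totient * P ^ (e - 1) * t' := by
    apply Nat.div_eq_of_eq_mul_left (by omega)
    calc s.totient * t = s.totient * (P ^ e * t') := by rw [hte]
      _ = s.totient * P ^ (e - 1) * t' * P := by rw [hde]; ring
  have hkey : s.totient * t - s.totient * t / P = Nat.totient (s * P ^ e) * t' := by
    rw [hdiv, hphi, hte, hde]
    have h1 : s.totient * (P ^ (e - 1) * (P - 1)) * t'
        = (s.totient * P ^ (e - 1) * t') * P - (s.totient * P ^ (e - 1) * t') * 1 := by
      rw [← Nat.mul_sub]
      ring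
    rw [h1, mul_one]
    congr 1
    ring
  refine ⟨s * P ^ e, t', by rw [hk, hte]; ring, ?_, ?_, ?_⟩
  · intro p hp
    have := Nat.mem_primeFactors.mp hp
    rcases (Nat.Prime.dvd_mul this.1).mp this.2.1 with h | h
    · have : p ∈ s.primeFactors := Nat.mem_primeFactors.mpr ⟨this.1, h, hs0⟩
      have := hs p this
      omega
    · have : p = P := (Nat.prime_dvd_prime_iff_eq this.1 hP).mp (this.1.dvd_of_dvd_pow h)
      omega
  · intro p pp hpt'
    have h1 := ht p pp (hpt'.trans ⟨P ^ e, by rw [hte]; ring⟩)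
    have : p ≠ P := by rintro rfl; exact hndt' hpt'
    omega
  · rw [hv, PySem.Int.floordiv_natCast, ← Nat.cast_sub (Nat.div_le_self _ _), hkey]

theorem pvBMix_init (N P : ℕ) (hP : P.Prime) (phi : List Int) (h : pvBInv N (P - 1) phi) :
    pvBMix N P 1 phi := by
  obtain ⟨hlen, H⟩ := h
  refine ⟨hlen, fun k hk => ⟨fun _ _ => H k hk, ?_⟩⟩
  intro hc
  rcases hc with hnd | hlt
  · exact pvGood_upgrade hP.two_le (Or.inl hnd) (H k hk)
  · by_cases hnd : P ∣ k
    · have hk0 : k = 0 := by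
        obtain ⟨m, rfl⟩ := hnd
        rcases Nat.eq_zero_or_pos m with rfl | h1
        · simp
        · exfalso; nlinarith [hP.two_le]
      subst hk0
      exact pvGood_zero_mk (pvGood_zero_val (H 0 hk))
    · exact pvGood_upgrade hP.two_le (Or.inl hnd) (H k hk)

theorem pvBMix_step (N P j : ℕ) (hP : P.Prime) (hj : P * (j + 1) ≤ N) (phi : List Int)
    (h : pvBMix N P (j + 1) phi) :
    pvBMix N P (j + 2) (pvAltInner (P : Int) phi ((P : Int) + (P : Int) * (j : Int))) := by
  have hP2 := hP.two_le
  obtain ⟨hlen, H⟩ := h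
  unfold pvAltInner
  rw [show (P : Int) + (P : Int) * (j : Int) = ((P * (j + 1) : ℕ) : Int) from by push_cast; ring,
    PySem.List.pyGetD_natCast, PySem.List.pySetD_natCast]
  have hold : pvGood (P - 1) (P * (j + 1)) (phi.getD (P * (j + 1)) 0) :=
    (H (P * (j + 1)) hj).1 ⟨j + 1, rfl⟩ le_rfl
  have hnew := pvBupdate hP (show 1 ≤ j + 1 by omega) hold
  refine ⟨by rw [List.length_set]; exact hlen, fun k hk => ?_⟩
  by_cases hkk : k = P * (j + 1)
  · subst hkk
    rw [pvGetD_set_self _ _ _ (by omega)]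
    constructor
    · intro _ hge
      have h2 : j + 2 ≤ j + 1 := Nat.le_of_mul_le_mul_left hge (by omega)
      omega
    · intro _
      exact hnew
  · rw [pvGetD_set_ne _ _ _ _ hkk]
    refine ⟨fun hd hge => (H k hk).1 hd
      (le_trans (Nat.mul_le_mul_left P (by omega)) hge), fun hc => ?_⟩
    rcases hc with hnd | hlt
    · exact (H k hk).2 (Or.inl hnd)
    · by_cases hnd : P ∣ k
      · obtain ⟨m, rfl⟩ := hnd
        have hm2 : m < j + 2 := by
          by_contra hge
          have hge' : j + 2 ≤ m := by omega
          have := Nat.mul_le_mul_left P hge'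
          omega
        have hm1 : m ≠ j + 1 := fun he => hkk (by rw [he])
        have hlt2 : P * m < P * (j + 1) := by nlinarith [show m ≤ j by omega]
        exact (H _ hk).2 (Or.inr hlt2)
      · exact (H k hk).2 (Or.inl hnd)

theorem pvBMix_fold (N P : ℕ) (hP : P.Prime) (phi : List Int)
    (h : pvBInv N (P - 1) phi) : ∀ j : ℕ, j ≤ N / P →
    pvBMix N P (j + 1) ((List.range j).foldl
      (fun acc t => pvAltInner (P : Int) acc ((P : Int) + (P : Int) * (Nat.cast t : Int))) phi) := by
  intro j
  induction j with
  | zero => intro _; simpa using pvBMix_init N P hP phi h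
  | succ j ih =>
    intro hle
    rw [List.range_succ, List.foldl_append, List.foldl_cons, List.foldl_nil]
    exact pvBMix_step N P j hP
      (by rw [mul_comm]; exact (Nat.le_div_iff_mul_le hP.pos).mp hle) _ (ih (by omega))

theorem pvBMix_finish (N P : ℕ) (hP : P.Prime) (phi : List Int)
    (h : pvBMix N P (N / P + 1) phi) : pvBInv N P phi := by
  obtain ⟨hlen, H⟩ := h
  refine ⟨hlen, fun k hk => ?_⟩
  by_cases hd : P ∣ k
  · obtain ⟨m, rfl⟩ := hd
    have hm : m ≤ N / P := (Nat.le_div_iff_mul_le hP.pos).mpr (by rw [mul_comm]; exact hk)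
    have hlt : P * m < P * (N / P + 1) := by nlinarith [hP.two_le]
    exact (H _ hk).2 (Or.inr hlt)
  · exact (H k hk).2 (Or.inl hd)

theorem pvBOuter_step (N P : ℕ) (hP2 : 2 ≤ P) (hPN : P ≤ N) (phi : List Int)
    (h : pvBInv N (P - 1) phi) : pvBInv N P (pvAltOuter (N : Int) phi (P : Int)) := by
  obtain ⟨hlen, H⟩ := h
  unfold pvAltOuter
  by_cases hPp : P.Prime
  · have hval : phi.getD P 0 = (P : Int) := pvGood_prime_val hPp (H P hPN)
    rw [if_pos (by rw [PySem.List.pyGetD_natCast, hval]; simp)]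
    have hcount : (if (P : Int) < (N : Int) + 1 then
          (((N : Int) + 1 - (P : Int) + (P : Int) - 1) / (P : Int)).toNat else 0) = N / P := by
      rw [if_pos (by exact_mod_cast (by omega : P < N + 1))]
      rw [show ((N : Int) + 1 - (P : Int) + (P : Int) - 1) = (N : Int) by ring,
        ← Int.natCast_div]
      exact Int.toNat_natCast _
    rw [PySem.List.pyRange_of_pos _ _ (by exact_mod_cast (by omega : 0 < P)), hcount,
      List.foldl_map]
    exact pvBMix_finish N P hPp _ (pvBMix_fold N P hPp phi ⟨hlen, H⟩ (N / P) le_rfl)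
  · obtain ⟨hval, hne⟩ := pvGood_comp_val hP2 hPp (H P hPN)
    have hcond : ¬ ((PySem.List.pyGetD phi (P : Int) 0 == (P : Int)) = true) := by
      rw [PySem.List.pyGetD_natCast, hval]
      simp only [beq_iff_eq, Nat.cast_inj]
      have := Nat.totient_lt P (by omega)
      omega
    rw [if_neg hcond]
    exact ⟨hlen, fun k hk => pvGood_upgrade hP2 (Or.inr hPp) (H k hk)⟩

theorem pvBInv_init (N : ℕ) (hN : 1 ≤ N) :
    pvBInv N 1 (PySem.List.pyRange 0 ((N : Int) + 1) 1) := by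
  constructor
  · rw [PySem.List.length_pyRange_one]
    omega
  · intro k hk
    have hget : (PySem.List.pyRange 0 ((N : Int) + 1) 1).getD k 0 = (k : Int) := by
      rw [PySem.List.pyRange_one,
        show ((N : Int) + 1 - 0).toNat = N + 1 from by omega,
        List.getD_eq_getElem?_getD, List.getElem?_map, List.getElem?_range (by omega)]
      simp
    rw [hget]
    rcases Nat.eq_zero_or_pos k with rfl | h1
    · exact pvGood_zero_mk (by simp)
    · exact ⟨1, k, by ring, pvSmooth_one 1, fun p pp _ => pp.one_lt,
        by simp [Nat.totient_one]⟩

theorem pvBOuter_fold (N : ℕ) (hN : 1 ≤ N) : ∀ i : ℕ, 1 ≤ i → i ≤ N →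
    pvBInv N i ((PySem.List.pyRange 2 ((i : Int) + 1) 1).foldl (pvAltOuter (N : Int))
      (PySem.List.pyRange 0 ((N : Int) + 1) 1)) := by
  intro i hi1
  induction i, hi1 using Nat.le_induction with
  | base =>
    intro _
    rw [show ((1 : ℕ) : Int) + 1 = 2 from by norm_num,
      PySem.List.pyRange_one_eq_nil (a := 2) (b := 2) (by norm_num), List.foldl_nil]
    exact pvBInv_init N hN
  | succ i hi ih =>
    intro hle
    have hsplit : PySem.List.pyRange 2 (((i + 1 : ℕ) : Int) + 1) 1
        = PySem.List.pyRange 2 ((i : Int) + 1) 1 ++ [(i : Int) + 1] := by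
      push_cast
      exact PySem.List.pyRange_one_succ_right (by exact_mod_cast (by omega : (2 : ℤ) ≤ (i : ℤ) + 1))
    rw [hsplit, List.foldl_append, List.foldl_cons, List.foldl_nil]
    have hstep := pvBOuter_step N (i + 1) (by omega) hle _
      (by rw [show i + 1 - 1 = i from by omega]; exact ih (by omega))
    rw [show ((i + 1 : ℕ) : Int) = (i : Int) + 1 from by push_cast; ring] at hstep
    exact hstep

theorem pvGood_final {N k : ℕ} {v : Int} (hk : k ≤ N) (h : pvGood N k v) :
    v = (Nat.totient k : Int) := by
  rcases Nat.eq_zero_or_pos k with rfl | h1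
  · rw [pvGood_zero_val h, Nat.totient_zero, Nat.cast_zero]
  · obtain ⟨s, t, hk', hs, ht, hv⟩ := h
    have ht0 : t ≠ 0 := by rintro rfl; rw [mul_zero] at hk'; omega
    have htk : t ∣ k := ⟨s, by rw [hk']; ring⟩
    have htN : t ≤ N := le_trans (Nat.le_of_dvd (by omega) htk) hk
    have ht1 : t = 1 := by
      by_contra hne
      have hq := Nat.minFac_prime hne
      have h2 := ht _ hq (Nat.minFac_dvd t)
      have h3 : t.minFac ≤ t := Nat.le_of_dvd (by omega) (Nat.minFac_dvd t)
      omega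
    subst ht1
    rw [mul_one] at hk'
    rw [hv, mul_one, ← hk']

theorem alt_eq_nat (N : ℕ) (hN : 1 ≤ N) :
    totient_table_alt (N : Int) = (List.range (N + 1)).map (fun k => (Nat.totient k : Int)) := by
  obtain ⟨hlen, H⟩ := pvBOuter_fold N hN N hN le_rfl
  unfold totient_table_alt
  apply List.ext_getElem
  · rw [hlen]
    simp
  · intro idx h1 h2
    rw [List.getElem_map, List.getElem_range]
    have hidx : idx ≤ N := by
      rw [hlen] at h1
      omega
    have hv := pvGood_final hidx (H idx hidx)
    rw [List.getD_eq_getElem?_getD, List.getElem?_eq_getElem h1] at hv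
    simpa using hv

theorem alt_eq (n : Int) (hn : 1 ≤ n) :
    totient_table_alt n = (List.range (n.toNat + 1)).map (fun k => (Nat.totient k : Int)) := by
  have hN : 1 ≤ n.toNat := by omega
  conv_lhs => rw [show n = (n.toNat : Int) from (Int.toNat_of_nonneg (by omega)).symm]
  exact alt_eq_nat n.toNat hN

-- ===== VERDICT (by name: the statement is the Claim_ definition above) =====
theorem totient_table_spec : Claim_equal_totient_table := by
  intro n _ hp
  unfold Spec_totient_table
  rw [a_eq n hp, alt_eq n hp]

theorem totient_table_raises : Claim_raises_totient_table := by
  unfold Claim_raises_totient_table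
  constructor
  · intro n _ h hp; exact absurd hp (by unfold Raises_totient_table at h; unfold Pre_totient_table; omega)
  · decide

-- self-check: the raise witness lies inside Raises_ and outside Pre_
theorem totient_table_raises_ok :
    Raises_totient_table pvRaiseWitness_totient_table ∧
      ¬ Pre_totient_table pvRaiseWitness_totient_table := by
  have h := totient_table_raises
  unfold Claim_raises_totient_table at h
  exact ⟨h.2.2.1, h.1 _ h.2.1 h.2.2.1⟩
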